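-- pv_equiv track=rewrite | github.com/dywzju09-blip/cpg_generator_export | tools/supplychain/derive_internal_baselines.py | choose_resource_row
-- ===== SOURCE A (Python) =====
-- def choose_resource_row(run_id: str, case_id: str, method: str, resource_rows: list[dict[str, str]]) -> dict[str, str] | None:
--     for row in resource_rows:
--         if row.get("run_id") == run_id:
--             return row
--     for row in resource_rows:
--         if row.get("case_id") == case_id and row.get("method") == method:
--             return row
--     return None
-- ===== SOURCE B (Python) =====
-- def choose_resource_row(run_id: str, case_id: str, method: str, resource_rows: list[dict[str, str]]) -> dict[str, str] | None:
--     fallback = None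
--     for row in resource_rows:
--         if row.get("run_id") == run_id:
--             return row
--         if fallback is None and row.get("case_id") == case_id and row.get("method") == method:
--             fallback = row
--     return fallback
-- ===== Notes on version B (the rewrite author's own statement) =====
-- stated objective: alternative
-- what changed: Replaces A's two sequential scans with a single pass that returns immediately on a run_id match and remembers the first case_id+method match in a fallback variable returned after the loop.
import Mathlib
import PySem

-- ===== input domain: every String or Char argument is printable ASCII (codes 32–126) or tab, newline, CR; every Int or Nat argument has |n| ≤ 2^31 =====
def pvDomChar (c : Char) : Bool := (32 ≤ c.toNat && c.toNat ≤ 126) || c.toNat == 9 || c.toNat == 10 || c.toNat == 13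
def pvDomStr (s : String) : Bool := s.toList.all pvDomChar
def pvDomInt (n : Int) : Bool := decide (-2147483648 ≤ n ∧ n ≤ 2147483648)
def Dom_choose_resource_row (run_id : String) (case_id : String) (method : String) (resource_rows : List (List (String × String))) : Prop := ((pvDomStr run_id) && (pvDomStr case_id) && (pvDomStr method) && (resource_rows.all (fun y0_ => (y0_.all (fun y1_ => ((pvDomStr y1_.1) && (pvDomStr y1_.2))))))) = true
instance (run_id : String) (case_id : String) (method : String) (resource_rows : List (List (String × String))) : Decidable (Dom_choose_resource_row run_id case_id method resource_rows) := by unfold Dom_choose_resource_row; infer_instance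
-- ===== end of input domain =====

-- B replaces A's two sequential scans with one pass keeping a fallback for the first case_id+method match (objective: alternative, single-pass decomposition).

-- ===== PORT A =====
-- row.get(k) on a dict-row (association list)
def pvRowGet (row : List (String × String)) (k : String) : Option String :=
  (PySem.Dict.mk row).get? k

-- first loop: for row in resource_rows: if row.get("run_id") == run_id: return row
def chooseA_loop1 (run_id : String) : List (List (String × String)) → Option (List (String × String))
  | [] => none
  | row :: rest =>
    if pvRowGet row "run_id" = some run_id then some row
    else chooseA_loop1 run_id rest

-- second loop: case_id and method match
def chooseA_loop2 (case_id method : String) : List (List (String × String)) → Option (List (String × String))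
  | [] => none
  | row :: rest =>
    if pvRowGet row "case_id" = some case_id ∧ pvRowGet row "method" = some method then some row
    else chooseA_loop2 case_id method rest

def choose_resource_row (run_id : String) (case_id : String) (method : String) (resource_rows : List (List (String × String))) : Option (List (String × String)) :=
  match chooseA_loop1 run_id resource_rows with
  | some row => some row
  | none =>
    match chooseA_loop2 case_id method resource_rows with
    | some row => some row
    | none => none

-- ===== PORT B =====
-- single pass with a fallback accumulator
def chooseB_go (run_id case_id method : String) (fallback : Option (List (String × String))) : List (List (String × String)) → Option (List (String × String))
  | [] => fallback
  | row :: rest =>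
    if pvRowGet row "run_id" = some run_id then some row
    else if fallback = none ∧ pvRowGet row "case_id" = some case_id ∧ pvRowGet row "method" = some method then
      chooseB_go run_id case_id method (some row) rest
    else chooseB_go run_id case_id method fallback rest

def choose_resource_row_alt (run_id : String) (case_id : String) (method : String) (resource_rows : List (List (String × String))) : Option (List (String × String)) :=
  chooseB_go run_id case_id method none resource_rows

-- ===== PRECONDITION & SPEC =====
def Spec_choose_resource_row (run_id : String) (case_id : String) (method : String) (resource_rows : List (List (String × String))) (out : Option (List (String × String))) : Prop := out = choose_resource_row_alt run_id case_id method resource_rows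
instance (run_id : String) (case_id : String) (method : String) (resource_rows : List (List (String × String))) (out : Option (List (String × String))) : Decidable (Spec_choose_resource_row run_id case_id method resource_rows out) := by unfold Spec_choose_resource_row; infer_instance

-- ===== CLAIM (what is proved, stated in full; the proofs are below) =====
def Claim_equal_choose_resource_row : Prop := ∀ (run_id : String) (case_id : String) (method : String) (resource_rows : List (List (String × String))), Dom_choose_resource_row run_id case_id method resource_rows → Spec_choose_resource_row run_id case_id method resource_rows (choose_resource_row run_id case_id method resource_rows)

-- ===== LEMMAS AND PROOFS =====
-- B's loop equals: a run_id match wins; otherwise the incoming fallback; otherwise the first case/method match.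
theorem chooseB_go_eq (run_id case_id method : String) (rows : List (List (String × String))) (fb : Option (List (String × String))) :
    chooseB_go run_id case_id method fb rows =
      match chooseA_loop1 run_id rows with
      | some r => some r
      | none => match fb with
        | some f => some f
        | none => chooseA_loop2 case_id method rows := by
  induction rows generalizing fb with
  | nil => simp [chooseB_go, chooseA_loop1, chooseA_loop2]; cases fb <;> rfl
  | cons row rest ih =>
    simp only [chooseB_go, chooseA_loop1, chooseA_loop2]
    by_cases h1 : pvRowGet row "run_id" = some run_id
    · simp [h1]
    · simp only [h1, if_false]
      by_cases h2 : pvRowGet row "case_id" = some case_id ∧ pvRowGet row "method" = some method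
      · cases fb with
        | none => simp [h2, ih]
        | some f => simp [h2, ih]
      · cases fb with
        | none => simp [h2, ih]
        | some f => simp [h2, ih]

-- ===== VERDICT (by name: the statement is the Claim_ definition above) =====
theorem choose_resource_row_spec : Claim_equal_choose_resource_row := by
  intro run_id case_id method rows _
  unfold Spec_choose_resource_row choose_resource_row choose_resource_row_alt
  rw [chooseB_go_eq]
  cases chooseA_loop1 run_id rows <;> cases chooseA_loop2 case_id method rows <;> rfl
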